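-- pv_equiv track=rewrite | github.com/Eemayas/Algorithm-and-Complexity-CE2020-Roll-30-COMP-314-Labs | Lab 2/sorting_random_data copy 4.py | create_best_case_quick_sort
-- ===== SOURCE A (Python) =====
-- def create_best_case_quick_sort(arr, start, end):
--     arr = sorted(arr)
--     # Base case: If start is greater than end, return an empty list
--     if start > end:
--         return []
--     # Find the middle index of the current range
--     mid = (start + end) // 2
--     # Recursively construct the left subarray
--     left = create_best_case_quick_sort(arr, start, mid - 1)
--     # Recursively construct the right subarray
--     right = create_best_case_quick_sort(arr, mid + 1, end)
--     # Place the middle element at the end to simulate it being the pivot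
--     return left + right + [arr[mid]]
-- ===== SOURCE B (Python) =====
-- def create_best_case_quick_sort(arr, start, end):
--     # Sort once, then produce the reversed right-first preorder with an explicit stack.
--     a = sorted(arr)
--     out = []
--     stack = [(start, end)]
--     while stack:
--         s, e = stack.pop()
--         if s > e:
--             continue
--         mid = (s + e) // 2
--         out.append(a[mid])
--         stack.append((s, mid - 1))
--         stack.append((mid + 1, e))
--     out.reverse()
--     return out
-- ===== Notes on version B (the rewrite author's own statement) =====
-- stated objective: alternative
-- what changed: B sorts the array once up front and replaces the re-sorting binary recursion by an explicit-stack right-first preorder loop whose output is reversed at the end, instead of A's recursion that re-sorts the whole array at every call.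
import Mathlib
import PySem

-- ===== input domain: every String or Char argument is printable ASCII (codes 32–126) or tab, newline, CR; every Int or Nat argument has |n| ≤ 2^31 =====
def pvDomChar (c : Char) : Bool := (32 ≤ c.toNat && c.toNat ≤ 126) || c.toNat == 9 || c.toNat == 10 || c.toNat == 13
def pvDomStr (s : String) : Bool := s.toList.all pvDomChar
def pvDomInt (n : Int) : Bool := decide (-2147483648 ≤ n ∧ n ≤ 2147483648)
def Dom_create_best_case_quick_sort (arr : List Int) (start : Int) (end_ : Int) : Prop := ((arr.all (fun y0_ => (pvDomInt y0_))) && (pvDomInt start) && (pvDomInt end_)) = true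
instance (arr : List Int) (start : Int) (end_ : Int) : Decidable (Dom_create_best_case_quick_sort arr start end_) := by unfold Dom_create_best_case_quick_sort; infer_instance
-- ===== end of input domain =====

-- B sorts once and emits the pivots with an explicit stack (reversed right-first preorder)
-- instead of A's recursion that re-sorts the array at every call (a structurally different alternative).


-- ===== PORT A =====
-- literal transliteration of A: re-sort at every call, recurse left, recurse right, pivot last.
-- The Nat fuel is only a totality guard: (end_-start+1).toNat+1 strictly exceeds the range size,
-- which shrinks at every recursive call, so fuel 0 is never reached.
-- arr[mid] is ported as PySem.List.pyGetD (total form); Pre_ below guarantees every mid is in range.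
def pvGoA : Nat → List Int → Int → Int → List Int
  | 0, _, _, _ => []
  | Nat.succ fuel, arr, start, end_ =>
    let a := PySem.List.sorted arr (fun x => x) false
    if start > end_ then []
    else
      let mid := PySem.Int.floordiv (start + end_) 2
      pvGoA fuel a start (mid - 1) ++ pvGoA fuel a (mid + 1) end_
        ++ [PySem.List.pyGetD a mid 0]

def create_best_case_quick_sort (arr : List Int) (start : Int) (end_ : Int) : List Int :=
  pvGoA ((end_ - start + 1).toNat + 1) arr start end_

-- ===== PORT B =====
-- the while-loop of Source B: Python's list-as-stack (pop/append at the end) is the Lean list head.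
-- The Nat fuel is only a totality guard: 2*(range size)+2 exceeds the number of loop iterations.
def pvLoopB : Nat → List Int → List (Int × Int) → List Int → List Int
  | 0, _, _, out => out
  | Nat.succ fuel, a, stack, out =>
    match stack with
    | [] => out
    | (s, e) :: rest =>
      if s > e then pvLoopB fuel a rest out
      else
        let mid := PySem.Int.floordiv (s + e) 2
        pvLoopB fuel a ((mid + 1, e) :: (s, mid - 1) :: rest)
          (out ++ [PySem.List.pyGetD a mid 0])

def create_best_case_quick_sort_alt (arr : List Int) (start : Int) (end_ : Int) : List Int :=
  let a := PySem.List.sorted arr (fun x => x) false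
  (pvLoopB ((end_ - start + 1).toNat * 2 + 2) a [(start, end_)] []).reverse

-- ===== PRECONDITION & SPEC =====
-- Pre_ excludes exactly the inputs where Python A raises IndexError: the pivots taken over the
-- recursion are exactly the indices start..end_, so A raises iff some index in that range is
-- outside [-len(arr), len(arr)).
def Pre_create_best_case_quick_sort (arr : List Int) (start : Int) (end_ : Int) : Prop :=
  start > end_ ∨ (-(arr.length : Int) ≤ start ∧ end_ < (arr.length : Int))
instance (arr : List Int) (start : Int) (end_ : Int) : Decidable (Pre_create_best_case_quick_sort arr start end_) := by unfold Pre_create_best_case_quick_sort; infer_instance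

def pvWitness_create_best_case_quick_sort : List Int × Int × Int := ([3, 1, 2], 0, 2)

def Spec_create_best_case_quick_sort (arr : List Int) (start : Int) (end_ : Int) (out : List Int) : Prop := out = create_best_case_quick_sort_alt arr start end_
instance (arr : List Int) (start : Int) (end_ : Int) (out : List Int) : Decidable (Spec_create_best_case_quick_sort arr start end_ out) := by unfold Spec_create_best_case_quick_sort; infer_instance

-- ===== CLAIM (what is proved, stated in full; the proofs are below) =====
def Claim_equal_create_best_case_quick_sort : Prop := ∀ (arr : List Int) (start : Int) (end_ : Int), Dom_create_best_case_quick_sort arr start end_ → Pre_create_best_case_quick_sort arr start end_ → Spec_create_best_case_quick_sort arr start end_ (create_best_case_quick_sort arr start end_)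

-- ===== LEMMAS AND PROOFS =====

-- the right-first preorder that pvLoopB's appends spell out (proof-only helper)
def pvPre (a : List Int) (s e : Int) : List Int :=
  if s > e then []
  else
    let mid := PySem.Int.floordiv (s + e) 2
    PySem.List.pyGetD a mid 0 :: (pvPre a (mid + 1) e ++ pvPre a s (mid - 1))
termination_by (e - s + 1).toNat
decreasing_by
  · have h := PySem.Int.floordiv_two_mid_bounds (lo := s) (hi := e) (by omega)
    omega
  · have h := PySem.Int.floordiv_two_mid_bounds (lo := s) (hi := e) (by omega)
    omega

-- with enough fuel the loop drains the stack into the concatenated right-first preorders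
theorem pvLoopB_spec (a : List Int) (fuel : Nat) (stack : List (Int × Int)) (out : List Int)
    (hf : (stack.map (fun p => (p.2 - p.1 + 1).toNat)).sum * 2 + stack.length < fuel) :
    pvLoopB fuel a stack out = out ++ (stack.map (fun p => pvPre a p.1 p.2)).flatten := by
  induction fuel generalizing stack out with
  | zero => omega
  | succ fuel ih =>
    match stack with
    | [] => simp [pvLoopB]
    | (s, e) :: rest =>
      rw [pvLoopB]
      simp only [List.map_cons, List.sum_cons, List.length_cons] at hf
      by_cases h : s > e
      · rw [if_pos h, ih rest out (by omega)]
        simp only [List.map_cons, List.flatten_cons]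
        rw [pvPre.eq_def]
        simp [h]
      · rw [if_neg h]
        have hm := PySem.Int.floordiv_two_mid_bounds (lo := s) (hi := e) (by omega)
        rw [ih _ _ (by simp only [List.map_cons, List.sum_cons, List.length_cons]; omega)]
        simp only [List.map_cons, List.flatten_cons]
        conv_rhs => rw [pvPre.eq_def]
        simp [h]

-- with enough fuel, A's recursion computes the reverse of the right-first preorder of the
-- once-sorted array (re-sorting the sorted array is a no-op, PySem.List.sorted_sorted)
theorem pvGoA_spec (fuel : Nat) (arr : List Int) (s e : Int)
    (hf : (e - s + 1).toNat < fuel) :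
    pvGoA fuel arr s e = (pvPre (PySem.List.sorted arr (fun x => x) false) s e).reverse := by
  induction fuel generalizing arr s e with
  | zero => omega
  | succ fuel ih =>
    rw [pvGoA, pvPre.eq_def]
    by_cases h : s > e
    · simp [h]
    · have hm := PySem.Int.floordiv_two_mid_bounds (lo := s) (hi := e) (by omega)
      simp only [h, if_false]
      rw [ih _ _ _ (by omega), ih _ _ _ (by omega), PySem.List.sorted_sorted]
      simp

theorem ports_agree (arr : List Int) (start end_ : Int) :
    create_best_case_quick_sort arr start end_
      = create_best_case_quick_sort_alt arr start end_ := by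
  rw [create_best_case_quick_sort, create_best_case_quick_sort_alt,
    pvGoA_spec _ _ _ _ (by omega),
    pvLoopB_spec _ _ _ _ (by simp only [List.map_cons, List.sum_cons, List.map_nil,
      List.sum_nil, List.length_cons, List.length_nil]; omega)]
  simp

-- ===== VERDICT (by name: the statement is the Claim_ definition above) =====
theorem create_best_case_quick_sort_spec : Claim_equal_create_best_case_quick_sort := by
  intro arr start end_ _ _
  unfold Spec_create_best_case_quick_sort
  exact ports_agree arr start end_
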